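-- pv_equiv track=rewrite | github.com/VivianeLe/Path_Flow_Prediction | utils.py | create_delta
-- ===== SOURCE A (Python) =====
-- def create_delta(links, paths, od_matrix) :
--     delta = [[[0 for i in range(links)] for p in paths[k]] for k in od_matrix.keys()]
--
--     kk = 0
--     for k in od_matrix.keys() :
--         value = paths[k]
--         pp = 0
--         for p in value : # p is a list of links
--             for j in p :
--                 delta[kk][pp][j]=1
--             pp += 1
--         kk += 1
--     return delta
-- ===== SOURCE B (Python) =====
-- def create_delta(links, paths, od_matrix):
--     result = []
--     for k in od_matrix:
--         rows = []
--         for p in paths[k]: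
--             link_set = set(p)
--             rows.append([1 if j in link_set else 0 for j in range(links)])
--         result.append(rows)
--     return result
-- ===== Notes on version B (the rewrite author's own statement) =====
-- stated objective: alternative
-- what changed: Replaces A's preallocate-zeros-then-scatter (building a 3D zero matrix and writing 1s into it by index) with a direct gather: each row is built in one comprehension testing membership of each column index in a per-path set, so no preallocation, no counters and no in-place indexed writes.
-- intended difference: On inputs where some path of a used od key contains a negative link index j (with -links <= j so A does not raise) whose wrapped column links+j is not also in that path, A marks column links+j via Python negative-index wraparound while B leaves it 0; B is intended since link ids are 0..links-1 and a negative id names no link. — e.g. on create_delta(2, [(0, [[-1]])], [(0, 5)]): A returns [[[0, 1]]], B returns [[[0, 0]]]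
import Mathlib
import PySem

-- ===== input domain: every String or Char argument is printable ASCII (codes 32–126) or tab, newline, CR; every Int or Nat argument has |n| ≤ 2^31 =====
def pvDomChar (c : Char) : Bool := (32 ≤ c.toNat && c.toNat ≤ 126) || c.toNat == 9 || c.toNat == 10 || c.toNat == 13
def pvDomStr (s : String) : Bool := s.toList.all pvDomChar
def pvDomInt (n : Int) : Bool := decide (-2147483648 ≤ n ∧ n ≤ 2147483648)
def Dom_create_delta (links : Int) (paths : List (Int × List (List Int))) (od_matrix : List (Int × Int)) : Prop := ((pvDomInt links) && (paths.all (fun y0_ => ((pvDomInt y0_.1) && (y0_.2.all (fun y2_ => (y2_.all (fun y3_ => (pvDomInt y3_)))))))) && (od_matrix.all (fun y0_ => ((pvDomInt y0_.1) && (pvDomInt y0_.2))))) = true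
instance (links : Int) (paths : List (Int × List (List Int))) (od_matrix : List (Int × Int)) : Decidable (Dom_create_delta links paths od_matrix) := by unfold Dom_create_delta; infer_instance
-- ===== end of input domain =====

-- B replaces A's preallocate-zeros-then-scatter with a per-path gather (membership test over
-- each column index); objective: alternative decomposition, same cost.

-- ===== PORT A =====
-- delta[kk][pp][j] = 1 : kk and pp are the loop counters, always in range of the lists they
-- index, so those two levels are List.modify (exact there); the innermost index j follows
-- Python list-assignment exactly via pySetD (negative j wraps; out-of-range j raises
-- IndexError in Python — those inputs are outside Pre_).
def pvSet3 (d : List (List (List Int))) (kk pp : Nat) (j : Int) : List (List (List Int)) :=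
  d.modify kk (fun m => m.modify pp (fun r => PySem.List.pySetD r j 1))

-- paths[k] is ported as getD k []: exact under Pre_ (every od_matrix key is a key of paths;
-- a missing key is Python's KeyError, outside Pre_).
def create_delta (links : Int) (paths : List (Int × List (List Int))) (od_matrix : List (Int × Int)) : List (List (List Int)) :=
  let pathsD := PySem.Dict.ofList paths
  let keys := (PySem.Dict.ofList od_matrix).keys
  let delta := keys.map (fun k =>
    (pathsD.getD k []).map (fun _ => (PySem.List.pyRange 0 links).map (fun _ => (0 : Int))))
  (keys.foldl (fun (st : List (List (List Int)) × Nat) k =>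
      let value := pathsD.getD k []
      let st2 := value.foldl (fun (st2 : List (List (List Int)) × Nat) p =>
          (p.foldl (fun d j => pvSet3 d st.2 st2.2 j) st2.1, st2.2 + 1)) (st.1, 0)
      (st2.1, st.2 + 1)) (delta, 0)).1

-- ===== PORT B =====
def create_delta_alt (links : Int) (paths : List (Int × List (List Int))) (od_matrix : List (Int × Int)) : List (List (List Int)) :=
  let pathsD := PySem.Dict.ofList paths
  ((PySem.Dict.ofList od_matrix).keys).map (fun k =>
    (pathsD.getD k []).map (fun p =>
      let linkSet : PySem.Set Int := PySem.Set.ofList p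
      (PySem.List.pyRange 0 links).map (fun j => if linkSet.contains j then (1 : Int) else 0)))

-- ===== PRECONDITION & SPEC =====
-- Pre_ excludes exactly the inputs where the Python A raises: an od_matrix key missing from
-- paths (KeyError) or a link index j outside -links ≤ j < links (IndexError).
def Pre_create_delta (links : Int) (paths : List (Int × List (List Int))) (od_matrix : List (Int × Int)) : Prop :=
  ∀ k ∈ (PySem.Dict.ofList od_matrix).keys,
    (PySem.Dict.ofList paths).contains k = true ∧
    ∀ p ∈ (PySem.Dict.ofList paths).getD k [], ∀ j ∈ p, -links ≤ j ∧ j < links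
instance (links : Int) (paths : List (Int × List (List Int))) (od_matrix : List (Int × Int)) : Decidable (Pre_create_delta links paths od_matrix) := by unfold Pre_create_delta; infer_instance

def pvWitness_create_delta : Int × (List (Int × List (List Int))) × (List (Int × Int)) :=
  (2, [(0, [[0, 1], [1]])], [(0, 7)])

-- On inputs where some path of a used od_matrix key contains a negative link index j (with
-- -links ≤ j so A does not raise) whose column links+j is not also in that path, A marks
-- column links+j via Python negative-index wraparound while B leaves it 0; B's row is the
-- intended incidence row, since link ids are 0..links-1 and a negative id names no link.
def D_create_delta (links : Int) (paths : List (Int × List (List Int))) (od_matrix : List (Int × Int)) : Prop :=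
  ∃ k ∈ (PySem.Dict.ofList od_matrix).keys,
    ∃ p ∈ (PySem.Dict.ofList paths).getD k [], ∃ j ∈ p, j < 0 ∧ links + j ∉ p
instance (links : Int) (paths : List (Int × List (List Int))) (od_matrix : List (Int × Int)) : Decidable (D_create_delta links paths od_matrix) := by unfold D_create_delta; infer_instance

def Spec_create_delta (links : Int) (paths : List (Int × List (List Int))) (od_matrix : List (Int × Int)) (out : List (List (List Int))) : Prop := ¬ D_create_delta links paths od_matrix → out = create_delta_alt links paths od_matrix
instance (links : Int) (paths : List (Int × List (List Int))) (od_matrix : List (Int × Int)) (out : List (List (List Int))) : Decidable (Spec_create_delta links paths od_matrix out) := by unfold Spec_create_delta; infer_instance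

def pvDiffWitness_create_delta : Int × (List (Int × List (List Int))) × (List (Int × Int)) :=
  (2, [(0, [[-1]])], [(0, 5)])
def pvDiffWitnessOut_create_delta : (List (List (List Int))) × (List (List (List Int))) :=
  ([[[0, 1]]], [[[0, 0]]])

-- ===== CLAIM (what is proved, stated in full; the proofs are below) =====
def Claim_unchanged_create_delta : Prop := ∀ (links : Int) (paths : List (Int × List (List Int))) (od_matrix : List (Int × Int)), Dom_create_delta links paths od_matrix → Pre_create_delta links paths od_matrix → Spec_create_delta links paths od_matrix (create_delta links paths od_matrix)
def Claim_changed_create_delta : Prop := Dom_create_delta (pvDiffWitness_create_delta.1) (pvDiffWitness_create_delta.2.1) (pvDiffWitness_create_delta.2.2) ∧ Pre_create_delta (pvDiffWitness_create_delta.1) (pvDiffWitness_create_delta.2.1) (pvDiffWitness_create_delta.2.2) ∧ D_create_delta (pvDiffWitness_create_delta.1) (pvDiffWitness_create_delta.2.1) (pvDiffWitness_create_delta.2.2) ∧ create_delta (pvDiffWitness_create_delta.1) (pvDiffWitness_create_delta.2.1) (pvDiffWitness_create_delta.2.2) = pvDiffWitnessOut_create_delta.1 ∧ create_delta_alt (pvDiffWitness_create_delta.1)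 (pvDiffWitness_create_delta.2.1) (pvDiffWitness_create_delta.2.2) = pvDiffWitnessOut_create_delta.2 ∧ pvDiffWitnessOut_create_delta.1 ≠ pvDiffWitnessOut_create_delta.2
def Claim_exact_create_delta : Prop := ∀ (links : Int) (paths : List (Int × List (List Int))) (od_matrix : List (Int × Int)), Dom_create_delta links paths od_matrix → Pre_create_delta links paths od_matrix → D_create_delta links paths od_matrix → create_delta links paths od_matrix ≠ create_delta_alt links paths od_matrix

-- ===== LEMMAS AND PROOFS =====

theorem pv_modify_modify {α : Type} (l : List α) (i : Nat) (f g : α → α) :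
    (l.modify i f).modify i g = l.modify i (fun a => g (f a)) := by
  induction l generalizing i with
  | nil => simp
  | cons a l ih => cases i <;> simp [ih]

theorem pv_modify_append_cons {α : Type} (pre : List α) (a : α) (l : List α) (f : α → α) :
    (pre ++ a :: l).modify pre.length f = pre ++ f a :: l := by
  induction pre with
  | nil => simp
  | cons b pre ih => simp [ih]

theorem pv_foldl_modify {α β : Type} (i : Nat) (F : α → β → β) :
    ∀ (xs : List α) (d : List β),
      xs.foldl (fun d x => d.modify i (F x)) d
        = d.modify i (fun b => xs.foldl (fun b x => F x b) b) := by
  intro xs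
  induction xs with
  | nil => intro d; exact (List.modify_id _ _).symm
  | cons x xs ih => intro d; simp only [List.foldl_cons, ih, pv_modify_modify]

-- collapse the innermost j-loop into one modify at (kk, pp)
theorem pv_jfold (kk pp : Nat) (p : List Int) (d : List (List (List Int))) :
    p.foldl (fun d j => pvSet3 d kk pp j) d
      = d.modify kk (fun m => m.modify pp
          (fun r => p.foldl (fun r j => PySem.List.pySetD r j 1) r)) := by
  unfold pvSet3
  rw [pv_foldl_modify kk (fun j m => m.modify pp (fun r => PySem.List.pySetD r j 1)) p d]
  congr 1
  funext m
  rw [pv_foldl_modify pp (fun j r => PySem.List.pySetD r j 1) p m]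

-- commute the fixed outer index kk out of a counter-fold
theorem pv_cfold_modify {α β : Type} (kk : Nat) (f : α → β → β) :
    ∀ (xs : List α) (d : List (List β)) (n : Nat),
      (xs.foldl (fun (st : List (List β) × Nat) x =>
          (st.1.modify kk (fun m => m.modify st.2 (f x)), st.2 + 1)) (d, n)).1
        = d.modify kk (fun m =>
            (xs.foldl (fun (st : List β × Nat) x =>
              (st.1.modify st.2 (f x), st.2 + 1)) (m, n)).1) := by
  intro xs
  induction xs with
  | nil => intro d n; exact (List.modify_id _ _).symm
  | cons x xs ih =>
    intro d n
    simp only [List.foldl_cons, ih, pv_modify_modify]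

-- a counter-fold that modifies slot #counter acts elementwise on a mapped initial list
theorem pv_cfold_map {α β : Type} (f : α → β → β) (g : α → β) :
    ∀ (xs : List α) (pre : List β),
      (xs.foldl (fun (st : List β × Nat) x =>
          (st.1.modify st.2 (f x), st.2 + 1)) (pre ++ xs.map g, pre.length)).1
        = pre ++ xs.map (fun x => f x (g x)) := by
  intro xs
  induction xs with
  | nil => intro pre; simp
  | cons x xs ih =>
    intro pre
    simp only [List.foldl_cons, List.map_cons, pv_modify_append_cons]
    have h := ih (pre ++ [f x (g x)])
    simp only [List.append_assoc, List.singleton_append, List.length_append,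
      List.length_cons, List.length_nil] at h ⊢
    simpa using h

theorem pv_cfold_map_nil {α β : Type} (f : α → β → β) (g : α → β) (xs : List α) :
    (xs.foldl (fun (st : List β × Nat) x =>
        (st.1.modify st.2 (f x), st.2 + 1)) (xs.map g, 0)).1
      = xs.map (fun x => f x (g x)) := by
  simpa using pv_cfold_map f g xs []

theorem pv_rowA_length (p : List Int) : ∀ (r : List Int),
    (p.foldl (fun r j => PySem.List.pySetD r j 1) r).length = r.length := by
  induction p with
  | nil => intro r; rfl
  | cons j p ih => intro r; simp [List.foldl_cons, ih, PySem.List.length_pySetD]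

-- Python's index wraparound for list assignment: j < 0 addresses length + j
def pvWrap (n : Nat) (j : Int) : Int := if j < 0 then (n : Int) + j else j

theorem pv_pySetD_wrap (r : List Int) (j : Int) (v : Int)
    (h1 : -(r.length : Int) ≤ j) (h2 : j < r.length) :
    PySem.List.pySetD r j v = r.set (pvWrap r.length j).toNat v := by
  by_cases hj : j < 0
  · simp only [pvWrap, if_pos hj]
    simp only [PySem.List.pySetD, PySem.List.pySet?, PySem.List.pyIdx?]
    rw [if_neg (by omega), if_pos h1]
    simp only [Option.map_some, Option.getD_some]
    congr 1
    omega
  · simp only [pvWrap, if_neg hj]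
    exact PySem.List.pySetD_of_nonneg r v (by omega)

theorem pv_rowA_getElem (p : List Int) :
    ∀ (r : List Int), (∀ j ∈ p, -(r.length : Int) ≤ j ∧ j < (r.length : Int)) →
    ∀ (i : Nat) (hi : i < r.length),
      (p.foldl (fun r j => PySem.List.pySetD r j 1) r)[i]'(by rw [pv_rowA_length]; exact hi)
        = if (∃ j ∈ p, pvWrap r.length j = (i : Int)) then 1 else r[i] := by
  induction p with
  | nil => intro r _ i hi; simp
  | cons j p ih =>
    intro r hp i hi
    obtain ⟨hj0, hjl⟩ := hp j (by simp)
    have hw : 0 ≤ pvWrap r.length j ∧ pvWrap r.length j < (r.length : Int) := by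
      unfold pvWrap; split <;> omega
    simp only [List.foldl_cons]
    simp only [pv_pySetD_wrap r j 1 hj0 hjl]
    have hlen : (r.set (pvWrap r.length j).toNat 1).length = r.length := by simp
    have hp' : ∀ j' ∈ p, -((r.set (pvWrap r.length j).toNat 1).length : Int) ≤ j' ∧
        j' < ((r.set (pvWrap r.length j).toNat 1).length : Int) := by
      intro j' hj'; rw [hlen]; exact hp j' (by simp [hj'])
    have hfold := ih (r.set (pvWrap r.length j).toNat 1) hp' i (by rw [hlen]; exact hi)
    rw [hfold]
    simp only [hlen]
    by_cases hex : ∃ j' ∈ p, pvWrap r.length j' = (i : Int)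
    · obtain ⟨j', hj', hwj'⟩ := hex
      rw [if_pos ⟨j', hj', hwj'⟩, if_pos ⟨j', List.mem_cons_of_mem j hj', hwj'⟩]
    · rw [if_neg hex, List.getElem_set]
      by_cases hij : pvWrap r.length j = (i : Int)
      · have hi' : (pvWrap r.length j).toNat = i := by omega
        rw [if_pos hi', if_pos ⟨j, List.mem_cons_self, hij⟩]
      · have hi' : (pvWrap r.length j).toNat ≠ i := by omega
        rw [if_neg hi', if_neg ?_]
        intro ⟨j', hj', hwj'⟩
        rcases List.mem_cons.mp hj' with h | h
        · exact hij (h ▸ hwj')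
        · exact hex ⟨j', h, hwj'⟩

theorem pv_row_eq (links : Int) (p : List Int)
    (hp : ∀ j ∈ p, -links ≤ j ∧ j < links)
    (hneg : ∀ j ∈ p, j < 0 → links + j ∈ p) :
    p.foldl (fun r j => PySem.List.pySetD r j 1)
        ((PySem.List.pyRange 0 links).map (fun _ => (0 : Int)))
      = (PySem.List.pyRange 0 links).map
          (fun j => if (PySem.Set.ofList p).contains j then (1 : Int) else 0) := by
  apply List.ext_getElem
  · rw [pv_rowA_length]; simp
  · intro i h1 h2
    have hr : ((PySem.List.pyRange 0 links).map (fun _ => (0 : Int))).length = (links - 0).toNat := by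
      simp [PySem.List.length_pyRange_one]
    have hi : i < ((PySem.List.pyRange 0 links).map (fun _ => (0 : Int))).length := by
      rw [pv_rowA_length] at h1; exact h1
    have hp' : ∀ j ∈ p, -(((PySem.List.pyRange 0 links).map (fun _ => (0 : Int))).length : Int) ≤ j ∧
        j < (((PySem.List.pyRange 0 links).map (fun _ => (0 : Int))).length : Int) := by
      intro j hj
      obtain ⟨h0, hl⟩ := hp j hj
      constructor <;> (rw [hr]; omega)
    rw [pv_rowA_getElem p _ hp' i hi]
    have hpy : i < (PySem.List.pyRange 0 links).length := by
      simpa using hi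
    simp only [List.getElem_map, PySem.List.getElem_pyRange_one 0 links i hpy, zero_add]
    have hcond : (∃ j ∈ p, pvWrap ((PySem.List.pyRange 0 links).map (fun _ => (0 : Int))).length j = (i : Int))
        ↔ (i : Int) ∈ p := by
      constructor
      · intro ⟨j, hj, hwj⟩
        obtain ⟨hlo, hhi⟩ := hp j hj
        have hpos : 0 < links := by omega
        unfold pvWrap at hwj
        by_cases hjn : j < 0
        · rw [if_pos hjn] at hwj
          have : (i : Int) = links + j := by rw [hr] at hwj; omega
          exact this ▸ hneg j hj hjn
        · rw [if_neg hjn] at hwj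
          exact hwj ▸ hj
      · intro hm
        exact ⟨(i : Int), hm, by unfold pvWrap; rw [if_neg (by omega)]⟩
    by_cases hm : (i : Int) ∈ p
    · rw [if_pos (hcond.mpr hm)]
      simp [hm, PySem.Set.mem_ofList]
    · rw [if_neg (fun h => hm (hcond.mp h))]
      simp [hm, PySem.Set.mem_ofList]

-- ===== VERDICT (by name: the statement is the Claim_ definition above) =====
theorem create_delta_spec : Claim_unchanged_create_delta := by
  intro links paths od_matrix _ hpre hnd
  show create_delta links paths od_matrix = create_delta_alt links paths od_matrix
  unfold Pre_create_delta at hpre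
  unfold D_create_delta at hnd
  unfold create_delta create_delta_alt
  simp only [pv_jfold, pv_cfold_modify]
  rw [pv_cfold_map_nil (fun k m => ((PySem.Dict.ofList paths).getD k []).foldl
        (fun (st : List (List Int) × Nat) p => (st.1.modify st.2
          (fun r => p.foldl (fun r j => PySem.List.pySetD r j 1) r), st.2 + 1)) (m, 0) |>.1)
      (fun k => ((PySem.Dict.ofList paths).getD k []).map (fun _ => (PySem.List.pyRange 0 links).map (fun _ => (0 : Int))))]
  apply List.map_congr_left
  intro k hk
  refine (pv_cfold_map_nil (fun (p : List Int) (r : List Int) => p.foldl (fun r j => PySem.List.pySetD r j 1) r)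
      (fun _ => (PySem.List.pyRange 0 links).map (fun _ => (0 : Int))) _).trans ?_
  apply List.map_congr_left
  intro p hp
  push Not at hnd
  exact pv_row_eq links p ((hpre k hk).2 p hp) (fun j hj hjn => hnd k hk p hp j hj hjn)

theorem create_delta_changed : Claim_changed_create_delta := by
  unfold Claim_changed_create_delta; decide

theorem create_delta_tight : Claim_exact_create_delta := by
  intro links paths od_matrix _ hpre hd heq
  unfold Pre_create_delta at hpre
  obtain ⟨k, hk, p, hp, j, hj, hjn, hnotin⟩ := hd
  obtain ⟨hlo, hhi⟩ := (hpre k hk).2 p hp j hj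
  have hpos : 0 < links := by omega
  unfold create_delta create_delta_alt at heq
  simp only [pv_jfold, pv_cfold_modify] at heq
  rw [pv_cfold_map_nil (fun k m => ((PySem.Dict.ofList paths).getD k []).foldl
        (fun (st : List (List Int) × Nat) p => (st.1.modify st.2
          (fun r => p.foldl (fun r j => PySem.List.pySetD r j 1) r), st.2 + 1)) (m, 0) |>.1)
      (fun k => ((PySem.Dict.ofList paths).getD k []).map (fun _ => (PySem.List.pyRange 0 links).map (fun _ => (0 : Int))))] at heq
  rw [List.map_inj_left] at heq
  have h2 := (pv_cfold_map_nil (fun (p : List Int) (r : List Int) => p.foldl (fun r j => PySem.List.pySetD r j 1) r)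
      (fun _ => (PySem.List.pyRange 0 links).map (fun _ => (0 : Int))) ((PySem.Dict.ofList paths).getD k [])).symm.trans (heq k hk)
  rw [List.map_inj_left] at h2
  have h3 := h2 p hp
  have hi : (links + j).toNat < ((PySem.List.pyRange 0 links).map (fun _ => (0 : Int))).length := by
    simp [PySem.List.length_pyRange_one]; omega
  have hp' : ∀ j' ∈ p, -(((PySem.List.pyRange 0 links).map (fun _ => (0 : Int))).length : Int) ≤ j' ∧
      j' < (((PySem.List.pyRange 0 links).map (fun _ => (0 : Int))).length : Int) := by
    intro j' hj'
    obtain ⟨h0, hl⟩ := (hpre k hk).2 p hp j' hj'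
    have : ((PySem.List.pyRange 0 links).map (fun _ => (0 : Int))).length = (links - 0).toNat := by
      simp [PySem.List.length_pyRange_one]
    constructor <;> (rw [this]; omega)
  have hlen0 : (((PySem.List.pyRange 0 links).map (fun _ => (0 : Int))).length : Int) = links := by
    simp only [List.length_map, PySem.List.length_pyRange_one]
    omega
  have hcond : pvWrap ((PySem.List.pyRange 0 links).map (fun _ => (0 : Int))).length j
      = (((links + j).toNat : Nat) : Int) := by
    unfold pvWrap
    rw [if_pos hjn, hlen0]
    omega
  have hL := pv_rowA_getElem p _ hp' (links + j).toNat hi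
  rw [if_pos ⟨j, hj, hcond⟩] at hL
  have hcast : (((links + j).toNat : Nat) : Int) = links + j := by omega
  have hR : ((PySem.List.pyRange 0 links).map
      (fun j' => if (PySem.Set.ofList p).contains j' then (1 : Int) else 0))[(links + j).toNat]'(by
        simpa [PySem.List.length_pyRange_one] using hi) = 0 := by
    have hpy : (links + j).toNat < (PySem.List.pyRange 0 links).length := by
      simp only [PySem.List.length_pyRange_one]
      omega
    simp only [List.getElem_map, PySem.List.getElem_pyRange_one 0 links _ hpy, zero_add]
    rw [if_neg]
    intro hc
    apply hnotin
    have hmem : (((links + j).toNat : Nat) : Int) ∈ p := by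
      rw [← PySem.Set.mem_ofList]
      simpa using hc
    rwa [hcast] at hmem
  have hiL : (links + j).toNat < (p.foldl (fun r j => PySem.List.pySetD r j 1)
      ((PySem.List.pyRange 0 links).map (fun _ => (0 : Int)))).length := by
    rw [pv_rowA_length]
    exact hi
  have hfin := List.getElem_of_eq h3 hiL
  rw [hL, hR] at hfin
  exact absurd hfin one_ne_zero
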